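-- pv_equiv track=rewrite | github.com/arclabs561/devguard | devguard/sweeps/dependency_audit.py | _cargo_severity_from_categories
-- ===== SOURCE A (Python) =====
-- def _cargo_severity_from_categories(categories: list[str]) -> str:
--     """Infer severity from cargo-audit advisory categories when no explicit severity."""
--     high_cats = {"memory-corruption", "memory-exposure", "code-execution"}
--     medium_cats = {"denial-of-service", "crypto-failure", "thread-safety"}
--     for cat in categories:
--         if cat in high_cats:
--             return "high"
--     for cat in categories:
--         if cat in medium_cats:
--             return "medium"
--     return "unknown"
-- ===== SOURCE B (Python) =====
-- def _cargo_severity_from_categories(categories: list[str]) -> str: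
--     """Infer severity from cargo-audit advisory categories when no explicit severity."""
--     high_cats = {"memory-corruption", "memory-exposure", "code-execution"}
--     medium_cats = {"denial-of-service", "crypto-failure", "thread-safety"}
--     seen_medium = False
--     for cat in categories:
--         if cat in high_cats:
--             return "high"
--         if cat in medium_cats:
--             seen_medium = True
--     return "medium" if seen_medium else "unknown"
-- ===== Notes on version B (the rewrite author's own statement) =====
-- stated objective: simpler
-- what changed: Replaced A's two sequential scans over categories with a single pass that returns 'high' immediately and records mediums in a seen_medium flag decided after the loop.
import Mathlib
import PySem

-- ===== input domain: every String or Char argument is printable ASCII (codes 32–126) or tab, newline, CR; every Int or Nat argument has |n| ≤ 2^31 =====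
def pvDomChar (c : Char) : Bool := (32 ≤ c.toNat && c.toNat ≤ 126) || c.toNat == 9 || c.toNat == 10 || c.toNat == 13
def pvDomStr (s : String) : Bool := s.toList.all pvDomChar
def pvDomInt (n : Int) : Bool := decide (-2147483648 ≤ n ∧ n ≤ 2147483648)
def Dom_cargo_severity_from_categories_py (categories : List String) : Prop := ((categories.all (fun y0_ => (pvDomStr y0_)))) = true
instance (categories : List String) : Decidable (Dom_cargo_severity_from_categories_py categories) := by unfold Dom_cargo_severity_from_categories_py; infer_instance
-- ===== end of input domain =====

-- B replaces A's two sequential scans with a single pass carrying a seen_medium flag (objective: simpler).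

-- ===== PORT A =====
def pvHighCats : List String := ["memory-corruption", "memory-exposure", "code-execution"]
def pvMediumCats : List String := ["denial-of-service", "crypto-failure", "thread-safety"]

-- first loop of A: early return "high"
def pvALoopHigh : List String → Option String
  | [] => none
  | cat :: rest => if cat ∈ pvHighCats then some "high" else pvALoopHigh rest

-- second loop of A: early return "medium"
def pvALoopMedium : List String → Option String
  | [] => none
  | cat :: rest => if cat ∈ pvMediumCats then some "medium" else pvALoopMedium rest

def cargo_severity_from_categories_py (categories : List String) : String :=
  match pvALoopHigh categories with
  | some s => s
  | none =>
    match pvALoopMedium categories with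
    | some s => s
    | none => "unknown"

-- ===== PORT B =====
def pvBHighCats : List String := ["memory-corruption", "memory-exposure", "code-execution"]
def pvBMediumCats : List String := ["denial-of-service", "crypto-failure", "thread-safety"]

def pvBLoop : List String → Bool → String
  | [], seen_medium => if seen_medium then "medium" else "unknown"
  | cat :: rest, seen_medium =>
    if cat ∈ pvBHighCats then "high"
    else pvBLoop rest (seen_medium || (cat ∈ pvBMediumCats))

def cargo_severity_from_categories_py_alt (categories : List String) : String :=
  pvBLoop categories false

-- ===== PRECONDITION & SPEC =====
def Spec_cargo_severity_from_categories_py (categories : List String) (out : String) : Prop := out = cargo_severity_from_categories_py_alt categories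
instance (categories : List String) (out : String) : Decidable (Spec_cargo_severity_from_categories_py categories out) := by unfold Spec_cargo_severity_from_categories_py; infer_instance

-- ===== CLAIM (what is proved, stated in full; the proofs are below) =====
def Claim_equal_cargo_severity_from_categories_py : Prop := ∀ (categories : List String), Dom_cargo_severity_from_categories_py categories → Spec_cargo_severity_from_categories_py categories (cargo_severity_from_categories_py categories)

-- ===== LEMMAS AND PROOFS =====

-- B's single pass characterised: "high" if any high category, else "medium" iff the flag or any medium category.
theorem pvBLoop_char (l : List String) (seen : Bool) :
    pvBLoop l seen =
      if l.any (· ∈ pvBHighCats) then "high"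
      else if seen || l.any (· ∈ pvBMediumCats) then "medium" else "unknown" := by
  induction l generalizing seen with
  | nil => simp [pvBLoop]
  | cons c rest ih =>
    by_cases hc : c ∈ pvBHighCats
    · simp [pvBLoop, hc]
    · simp only [pvBLoop, hc, if_neg, ih, List.any_cons]
      by_cases hm : c ∈ pvBMediumCats <;> simp [hm, hc]

theorem pvALoopHigh_char (l : List String) :
    pvALoopHigh l = if l.any (· ∈ pvHighCats) then some "high" else none := by
  induction l with
  | nil => simp [pvALoopHigh]
  | cons c rest ih =>
    by_cases hc : c ∈ pvHighCats <;> simp [pvALoopHigh, hc, ih]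

theorem pvALoopMedium_char (l : List String) :
    pvALoopMedium l = if l.any (· ∈ pvMediumCats) then some "medium" else none := by
  induction l with
  | nil => simp [pvALoopMedium]
  | cons c rest ih =>
    by_cases hc : c ∈ pvMediumCats <;> simp [pvALoopMedium, hc, ih]

-- ===== VERDICT (by name: the statement is the Claim_ definition above) =====
theorem cargo_severity_from_categories_py_spec : Claim_equal_cargo_severity_from_categories_py := by
  intro categories _
  unfold Spec_cargo_severity_from_categories_py cargo_severity_from_categories_py
    cargo_severity_from_categories_py_alt
  rw [pvBLoop_char, pvALoopHigh_char, pvALoopMedium_char]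
  have eH : pvBHighCats = pvHighCats := rfl
  have eM : pvBMediumCats = pvMediumCats := rfl
  rw [eH, eM]
  by_cases h1 : categories.any (· ∈ pvHighCats) <;>
    by_cases h2 : categories.any (· ∈ pvMediumCats) <;> simp [h1, h2]
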